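-- pv_equiv track=rewrite | github.com/filipcima/2020-mpzz | relations_properties.py | asymmetric
-- ===== SOURCE A (Python) =====
-- def asymmetric(R, A):
--     """Returns True if a relation R on set A is asymmetric, False otherwise."""
--     for (a, b) in R:
--         if (b, a) in R:
--             return False
--
--     for x in A:
--         if (x, x) in R:
--             return False
--
--     return True
-- ===== SOURCE B (Python) =====
-- def asymmetric(R, A):
--     """Returns True if a relation R on set A is asymmetric, False otherwise."""
--     orient = {}
--     for (a, b) in R:
--         key = (min(a, b), max(a, b))
--         fwd, rev = orient.get(key, (False, False))
--         orient[key] = (fwd or a <= b, rev or b <= a)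
--     return all(not (fwd and rev) for (fwd, rev) in orient.values())
-- ===== Notes on version B (the rewrite author's own statement) =====
-- stated objective: alternative
-- what changed: Replaces the membership-scan loops (inner '(b,a) in R' test and a redundant reflexive scan over A) by a single pass that buckets each pair under its unordered key (min,max) in a dict of orientation flags, then checks no bucket saw both orientations; the loop over A disappears because a reflexive pair yields both orientations at once.
import Mathlib
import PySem

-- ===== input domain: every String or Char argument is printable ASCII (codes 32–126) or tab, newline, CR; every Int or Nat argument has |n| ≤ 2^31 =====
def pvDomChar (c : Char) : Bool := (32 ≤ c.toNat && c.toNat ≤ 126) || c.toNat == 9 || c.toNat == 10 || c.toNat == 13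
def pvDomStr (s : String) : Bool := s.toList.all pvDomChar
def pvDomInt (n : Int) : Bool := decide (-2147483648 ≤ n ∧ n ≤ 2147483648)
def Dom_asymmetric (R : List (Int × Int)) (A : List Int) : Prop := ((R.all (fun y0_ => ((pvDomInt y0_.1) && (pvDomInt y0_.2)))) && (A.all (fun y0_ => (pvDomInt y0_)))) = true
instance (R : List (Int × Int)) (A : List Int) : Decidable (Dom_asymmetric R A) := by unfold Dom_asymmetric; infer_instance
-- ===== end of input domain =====

-- B replaces A's membership-scan loops by one pass bucketing each pair under its
-- unordered key (min,max) into a dict of orientation flags, then a values scan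
-- (objective: alternative; the loop over A is redundant and disappears).

-- ===== PORT A =====
-- first loop: for (a, b) in R: if (b, a) in R: return False
def asymLoopR (R : List (Int × Int)) : List (Int × Int) → Option Bool
  | [] => none
  | (a, b) :: rest => if (b, a) ∈ R then some false else asymLoopR R rest

-- second loop: for x in A: if (x, x) in R: return False
def asymLoopA (R : List (Int × Int)) : List Int → Option Bool
  | [] => none
  | x :: rest => if (x, x) ∈ R then some false else asymLoopA R rest

def asymmetric (R : List (Int × Int)) (A : List Int) : Bool :=
  match asymLoopR R R with
  | some r => r
  | none =>
    match asymLoopA R A with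
    | some r => r
    | none => true

-- ===== PORT B =====
-- loop body: key = (min(a,b), max(a,b)); fwd, rev = orient.get(key, (False, False));
--            orient[key] = (fwd or a <= b, rev or b <= a)
def orientStep (d : PySem.Dict (Int × Int) (Bool × Bool)) (p : Int × Int) :
    PySem.Dict (Int × Int) (Bool × Bool) :=
  let key := (min p.1 p.2, max p.1 p.2)
  let fr := d.getD key (false, false)
  d.insert key (fr.1 || decide (p.1 ≤ p.2), fr.2 || decide (p.2 ≤ p.1))

def asymmetric_alt (R : List (Int × Int)) (A : List Int) : Bool :=
  let orient := R.foldl orientStep PySem.Dict.empty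
  orient.values.all (fun fr => !(fr.1 && fr.2))

-- ===== PRECONDITION & SPEC =====
def Spec_asymmetric (R : List (Int × Int)) (A : List Int) (out : Bool) : Prop := out = asymmetric_alt R A
instance (R : List (Int × Int)) (A : List Int) (out : Bool) : Decidable (Spec_asymmetric R A out) := by unfold Spec_asymmetric; infer_instance

-- ===== CLAIM (what is proved, stated in full; the proofs are below) =====
def Claim_equal_asymmetric : Prop := ∀ (R : List (Int × Int)) (A : List Int), Dom_asymmetric R A → Spec_asymmetric R A (asymmetric R A)

-- ===== LEMMAS AND PROOFS =====

-- A's first loop returns (some false) exactly when some pair's reverse is in R.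
theorem asymLoopR_eq (R L : List (Int × Int)) :
    asymLoopR R L = if ∃ p ∈ L, (p.2, p.1) ∈ R then some false else none := by
  induction L with
  | nil => simp [asymLoopR]
  | cons hd tl ih =>
    obtain ⟨a, b⟩ := hd
    simp only [asymLoopR, ih]
    by_cases h : (b, a) ∈ R <;> by_cases h' : ∃ p ∈ tl, (p.2, p.1) ∈ R <;>
      simp [h, h']

-- if no pair of R has its reverse in R, then in particular no (x, x) ∈ R.
theorem asymLoopA_eq_none (R : List (Int × Int)) (A : List Int)
    (h : ¬ ∃ p ∈ R, (p.2, p.1) ∈ R) : asymLoopA R A = none := by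
  induction A with
  | nil => rfl
  | cons x tl ih =>
    simp only [asymLoopA]
    rw [if_neg, ih]
    intro hx
    exact h ⟨(x, x), hx, hx⟩

-- the orientation flags accumulated by B's loop, characterised pointwise.
theorem getD_foldl_orientStep (L : List (Int × Int))
    (d : PySem.Dict (Int × Int) (Bool × Bool)) (k : Int × Int) :
    (L.foldl orientStep d).getD k (false, false) =
      ((d.getD k (false, false)).1 ||
         L.any (fun p => decide ((min p.1 p.2, max p.1 p.2) = k) && decide (p.1 ≤ p.2)),
       (d.getD k (false, false)).2 ||
         L.any (fun p => decide ((min p.1 p.2, max p.1 p.2) = k) && decide (p.2 ≤ p.1))) := by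
  induction L generalizing d with
  | nil => simp
  | cons p tl ih =>
    simp only [List.foldl_cons, ih, List.any_cons]
    have hstep : (orientStep d p).getD k (false, false) =
        if k = (min p.1 p.2, max p.1 p.2) then
          ((d.getD (min p.1 p.2, max p.1 p.2) (false, false)).1 || decide (p.1 ≤ p.2),
           (d.getD (min p.1 p.2, max p.1 p.2) (false, false)).2 || decide (p.2 ≤ p.1))
        else d.getD k (false, false) := by
      simp only [orientStep]
      rw [PySem.Dict.getD_insert]
    by_cases hk : k = (min p.1 p.2, max p.1 p.2)
    · subst hk
      simp [hstep, Bool.or_assoc, Bool.or_comm, Bool.or_left_comm]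
    · have : ((min p.1 p.2, max p.1 p.2) = k) = False := by
        simp [Ne.symm hk]
      simp [hstep, hk, this]

-- B computed: true ⟺ no pair of R has its reverse in R.
theorem asymmetric_alt_eq (R : List (Int × Int)) (A : List Int) :
    asymmetric_alt R A = decide (¬ ∃ p ∈ R, (p.2, p.1) ∈ R) := by
  simp only [asymmetric_alt]
  have horient : orientStep = fun d (p : Int × Int) =>
      d.insert (min p.1 p.2, max p.1 p.2)
        ((d.getD (min p.1 p.2, max p.1 p.2) (false, false)).1 || decide (p.1 ≤ p.2),
         (d.getD (min p.1 p.2, max p.1 p.2) (false, false)).2 || decide (p.2 ≤ p.1)) := rfl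
  have hnd : (R.foldl orientStep PySem.Dict.empty).keys.Nodup := by
    rw [horient]
    exact PySem.Dict.nodup_keys_foldl_insert_key R
      (fun p => (min p.1 p.2, max p.1 p.2)) _ PySem.Dict.empty (by simp)
  have hkeys : ∀ k : Int × Int,
      k ∈ (R.foldl orientStep PySem.Dict.empty).keys ↔
        k ∈ R.map (fun p => (min p.1 p.2, max p.1 p.2)) := by
    intro k
    have h1 : (R.foldl orientStep PySem.Dict.empty).keys =
        PySem.Set.update (PySem.Dict.empty :
            PySem.Dict (Int × Int) (Bool × Bool)).keys
          (R.map fun p => (min p.1 p.2, max p.1 p.2)) := by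
      rw [horient]
      exact PySem.Dict.keys_foldl_insert_key R (fun p => (min p.1 p.2, max p.1 p.2)) _ _
    rw [h1]
    rw [show PySem.Set.update (PySem.Dict.empty :
          PySem.Dict (Int × Int) (Bool × Bool)).keys
          (R.map fun p => (min p.1 p.2, max p.1 p.2)) =
        PySem.Set.ofList (R.map fun p => (min p.1 p.2, max p.1 p.2)) from rfl]
    exact PySem.Set.mem_ofList _ _
  rw [PySem.Dict.values_eq_map_keys _ hnd (false, false)]
  apply Bool.eq_iff_iff.mpr
  rw [List.all_map, List.all_eq_true, decide_eq_true_iff]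
  constructor
  · -- every bucket clean → no reverse pair
    rintro h ⟨⟨a, b⟩, haR, hrev⟩
    set k : Int × Int := (min a b, max a b) with hkdef
    have hkmem : k ∈ (R.foldl orientStep PySem.Dict.empty).keys :=
      (hkeys k).mpr (List.mem_map.mpr ⟨(a, b), haR, rfl⟩)
    have hclean := h k hkmem
    simp only [Function.comp_apply] at hclean
    rw [getD_foldl_orientStep] at hclean
    simp only [PySem.Dict.getD_empty, Bool.false_or, Bool.not_and,
      Bool.or_eq_true, Bool.not_eq_true'] at hclean
    have hfwd : R.any (fun p => decide ((min p.1 p.2, max p.1 p.2) = k) && decide (p.1 ≤ p.2)) = true := by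
      rcases le_total a b with hab | hba
      · exact List.any_eq_true.mpr ⟨(a, b), haR, by simp [hkdef, hab]⟩
      · exact List.any_eq_true.mpr ⟨(b, a), hrev, by
          simp only [decide_eq_true_eq, Bool.and_eq_true]
          exact ⟨by simp [hkdef, min_comm, max_comm], hba⟩⟩
    have hrv : R.any (fun p => decide ((min p.1 p.2, max p.1 p.2) = k) && decide (p.2 ≤ p.1)) = true := by
      rcases le_total a b with hab | hba
      · exact List.any_eq_true.mpr ⟨(b, a), hrev, by
          simp only [decide_eq_true_eq, Bool.and_eq_true]
          exact ⟨by simp [hkdef, min_comm, max_comm], hab⟩⟩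
      · exact List.any_eq_true.mpr ⟨(a, b), haR, by simp [hkdef, hba]⟩
    rcases hclean with h1 | h2
    · rw [hfwd] at h1; exact absurd h1 (by simp)
    · rw [hrv] at h2; exact absurd h2 (by simp)
  · -- no reverse pair → every bucket clean
    intro h k _
    simp only [Function.comp_apply]
    rw [getD_foldl_orientStep]
    simp only [PySem.Dict.getD_empty, Bool.false_or, Bool.not_and,
      Bool.or_eq_true, Bool.not_eq_true']
    by_contra hcon
    rw [not_or] at hcon
    obtain ⟨h1, h2⟩ := hcon
    simp only [Bool.not_eq_false, List.any_eq_true] at h1 h2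
    obtain ⟨⟨a, b⟩, habR, hab⟩ := h1
    obtain ⟨⟨c, d⟩, hcdR, hcd⟩ := h2
    simp only [Bool.and_eq_true, decide_eq_true_eq] at hab hcd
    obtain ⟨hk1, hle1⟩ := hab
    obtain ⟨hk2, hle2⟩ := hcd
    have hmin1 : min a b = a := min_eq_left hle1
    have hmax1 : max a b = b := max_eq_right hle1
    have hmin2 : min c d = d := min_eq_right hle2
    have hmax2 : max c d = c := max_eq_left hle2
    rw [hmin1, hmax1] at hk1
    rw [hmin2, hmax2] at hk2
    rw [← hk1] at hk2
    have hda : d = a := (Prod.mk.injEq _ _ _ _ ▸ hk2).1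
    have hcb : c = b := (Prod.mk.injEq _ _ _ _ ▸ hk2).2
    exact h ⟨(a, b), habR, by rw [← hda, ← hcb]; exact hcdR⟩

-- ===== VERDICT (by name: the statement is the Claim_ definition above) =====
theorem asymmetric_spec : Claim_equal_asymmetric := by
  intro R A _
  unfold Spec_asymmetric asymmetric
  rw [asymLoopR_eq, asymmetric_alt_eq]
  by_cases h : ∃ p ∈ R, (p.2, p.1) ∈ R
  · simp [h]
  · simp only [h, if_neg, not_false_eq_true, decide_true]
    rw [asymLoopA_eq_none R A h]
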